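-- pv_equiv track=rewrite | github.com/ThanhDuy190304/HCMUS-Project1-AresAdventure | Source/support.py | find_boxes_position
-- ===== SOURCE A (Python) =====
-- def find_boxes_position(grid, stone_weights):
--     boxes = {}
--     stone_index = 0
--     for row in range(len(grid)):
--         for col in range(len(grid[0])):
--             if (grid[row][col] == '$' or grid[row][col] == '*') and stone_index < len(stone_weights):
--                 boxes[(row, col)] = stone_weights[stone_index]
--                 stone_index += 1
--     return boxes
-- ===== SOURCE B (Python) =====
-- def find_boxes_position(grid, stone_weights):
--     width = len(grid[0]) if grid else 0
--
--     def row_boxes(r):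
--         return [c for c in range(width) if grid[r][c] in ('$', '*')]
--
--     # pass 1: count boxes in each row and derive exclusive prefix sums
--     offsets, total = [], 0
--     for r in range(len(grid)):
--         offsets.append(total)
--         total += len(row_boxes(r))
--
--     # pass 2: a box's weight index is computed arithmetically from its row's offset
--     boxes = {}
--     for r, off in zip(range(len(grid)), offsets):
--         for i, c in enumerate(row_boxes(r)):
--             if off + i < len(stone_weights):
--                 boxes[(r, c)] = stone_weights[off + i]
--     return boxes
-- ===== Notes on version B (the rewrite author's own statement) =====
-- stated objective: alternative
-- what changed: Replaces A's single interleaved scan with a mutable stone_index counter by a two-pass prefix-sum algorithm: pass 1 counts boxes per row and builds exclusive prefix-sum offsets, pass 2 assigns each box the weight at the arithmetically computed index offset[row]+position-in-row, so no counter state crosses cells or rows.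
import Mathlib
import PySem

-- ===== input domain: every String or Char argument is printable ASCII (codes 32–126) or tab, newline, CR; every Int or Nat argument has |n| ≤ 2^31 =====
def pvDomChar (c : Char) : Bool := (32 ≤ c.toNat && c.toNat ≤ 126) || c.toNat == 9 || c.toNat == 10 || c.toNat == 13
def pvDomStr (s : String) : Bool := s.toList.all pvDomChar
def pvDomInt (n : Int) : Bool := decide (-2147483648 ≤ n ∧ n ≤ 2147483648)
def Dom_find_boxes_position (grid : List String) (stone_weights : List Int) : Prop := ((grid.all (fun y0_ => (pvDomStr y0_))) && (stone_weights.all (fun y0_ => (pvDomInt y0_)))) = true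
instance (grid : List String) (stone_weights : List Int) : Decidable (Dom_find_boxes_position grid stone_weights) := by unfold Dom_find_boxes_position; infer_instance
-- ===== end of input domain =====

-- B replaces A's single interleaved scan with a mutable stone_index counter by a two-pass
-- prefix-sum algorithm: count boxes per row, build exclusive prefix-sum offsets, then assign
-- each box the weight at the arithmetic index offset[row]+position-in-row (objective: alternative).

-- ===== PORT A =====
-- string indexing grid[row][col] is ported exactly via PySem.List.pyGetD on .toList
-- (in range on every input Pre_ admits; Python raises outside Pre_)
def find_boxes_position (grid : List String) (stone_weights : List Int) : List (Int × Int × Int) :=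
  let st :=
    (PySem.List.pyRange 0 (PySem.List.len grid) 1).foldl
      (fun st row =>
        (PySem.List.pyRange 0 (PySem.Str.len (PySem.List.pyGetD grid 0 "")) 1).foldl
          (fun (st : PySem.Dict (Int × Int) Int × Int) col =>
            let cell := PySem.List.pyGetD (PySem.List.pyGetD grid row "").toList col ' '
            if (cell == '$' || cell == '*') && decide (st.2 < PySem.List.len stone_weights) then
              (st.1.insert (row, col) (PySem.List.pyGetD stone_weights st.2 0), st.2 + 1)
            else st)
          st)
      ((PySem.Dict.empty : PySem.Dict (Int × Int) Int), (0 : Int))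
  st.1.items.map (fun p => (p.1.1, p.1.2, p.2))

-- ===== PORT B =====
def find_boxes_position_alt (grid : List String) (stone_weights : List Int) : List (Int × Int × Int) :=
  let width : Int := match grid with | [] => 0 | g :: _ => PySem.Str.len g
  let rowBoxes : Int → List Int := fun r =>
    (PySem.List.pyRange 0 width 1).filter (fun c =>
      let cell := PySem.List.pyGetD (PySem.List.pyGetD grid r "").toList c ' '
      cell == '$' || cell == '*')
  -- pass 1: counts per row, exclusive prefix sums
  let offsets : List Int :=
    ((PySem.List.pyRange 0 (PySem.List.len grid) 1).foldl
      (fun (st : List Int × Int) r => (st.1 ++ [st.2], st.2 + PySem.List.len (rowBoxes r)))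
      ([], 0)).1
  -- pass 2: weight index computed arithmetically from the row's offset
  let d := ((PySem.List.pyRange 0 (PySem.List.len grid) 1).zip offsets).foldl
      (fun (d : PySem.Dict (Int × Int) Int) ro =>
        (PySem.List.enumerate (rowBoxes ro.1)).foldl
          (fun (d : PySem.Dict (Int × Int) Int) ic =>
            if decide (ro.2 + ic.1 < PySem.List.len stone_weights) then
              d.insert (ro.1, ic.2) (PySem.List.pyGetD stone_weights (ro.2 + ic.1) 0)
            else d)
          d)
      PySem.Dict.empty
  d.items.map (fun p => (p.1.1, p.1.2, p.2))

-- ===== PRECONDITION & SPEC =====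
-- Pre_ excludes exactly the ragged grids on which Python A raises IndexError
-- (a row shorter than the first row); A returns on every other input.
def Pre_find_boxes_position (grid : List String) (stone_weights : List Int) : Prop :=
  ∀ s ∈ grid, PySem.Str.len (grid.headD "") ≤ PySem.Str.len s
instance (grid : List String) (stone_weights : List Int) : Decidable (Pre_find_boxes_position grid stone_weights) := by unfold Pre_find_boxes_position; infer_instance

def pvWitness_find_boxes_position : List String × List Int := (["#$ .", "*.$#"], [3, 5])

def Spec_find_boxes_position (grid : List String) (stone_weights : List Int) (out : List (Int × Int × Int)) : Prop := out = find_boxes_position_alt grid stone_weights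
instance (grid : List String) (stone_weights : List Int) (out : List (Int × Int × Int)) : Decidable (Spec_find_boxes_position grid stone_weights out) := by unfold Spec_find_boxes_position; infer_instance

-- ===== CLAIM (what is proved, stated in full; the proofs are below) =====
def Claim_equal_find_boxes_position : Prop := ∀ (grid : List String) (stone_weights : List Int), Dom_find_boxes_position grid stone_weights → Pre_find_boxes_position grid stone_weights → Spec_find_boxes_position grid stone_weights (find_boxes_position grid stone_weights)

-- ===== LEMMAS AND PROOFS =====

-- foldl over a flatMap is the nested foldl
lemma pv_foldl_flatMap {α β σ : Type} (l : List α) (f : α → List β) (g : σ → β → σ) (s : σ) :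
    (l.flatMap f).foldl g s = l.foldl (fun s a => (f a).foldl g s) s := by
  induction l generalizing s with
  | nil => rfl
  | cons a l ih => simp [List.flatMap_cons, List.foldl_append, ih]

-- zip distributes over append on the left, dropping the consumed prefix on the right
lemma pv_zip_append {α β : Type} (a b : List α) (sw : List β) :
    (a ++ b).zip sw = a.zip sw ++ b.zip (sw.drop a.length) := by
  induction a generalizing sw with
  | nil => simp
  | cons x xs ih => cases sw with
    | nil => simp
    | cons w ws => simp [ih]

-- A's scan-with-counter over any cell list equals folding inserts over the
-- filtered cells zipped with the remaining weights.
lemma pv_foldA_eq (sw : List Int) (P : Int × Int → Bool) :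
    ∀ (cells : List (Int × Int)) (d : PySem.Dict (Int × Int) Int) (n : Nat), n ≤ sw.length →
      cells.foldl
        (fun (st : PySem.Dict (Int × Int) Int × Int) c =>
          if P c && decide (st.2 < PySem.List.len sw) then
            (st.1.insert c (PySem.List.pyGetD sw st.2 0), st.2 + 1)
          else st)
        (d, (n : Int))
      = (((cells.filter P).zip (sw.drop n)).foldl
           (fun d p => d.insert p.1 p.2) d,
         ((n + min ((cells.filter P).length) (sw.length - n) : Nat) : Int)) := by
  intro cells
  induction cells with
  | nil => intro d n hn; simp
  | cons c cs ih =>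
    intro d n hn
    by_cases hP : P c = true
    · by_cases hlt : n < sw.length
      · have hdec : (P c && decide ((n : Int) < PySem.List.len sw)) = true := by
          simp [hP, PySem.List.len_eq]; exact_mod_cast hlt
        have hget : PySem.List.pyGetD sw (n : Int) 0 = sw[n] := by
          simp [PySem.List.pyGetD_natCast, List.getD_eq_getElem?_getD, List.getElem?_eq_getElem hlt]
        have hdrop : sw.drop n = sw[n] :: sw.drop (n + 1) := by
          rw [List.getElem_cons_drop hlt]
        have h1 : ((n : Int) + 1) = ((n + 1 : Nat) : Int) := by push_cast; ring
        simp only [List.foldl_cons, hdec, hget, h1, if_true]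
        rw [ih (d.insert c sw[n]) (n + 1) hlt]
        rw [List.filter_cons_of_pos hP, hdrop]
        simp only [List.zip_cons_cons, List.foldl_cons, List.length_cons]
        simp only [Prod.mk.injEq]
        refine ⟨trivial, ?_⟩
        congr 1
        omega
      · have hn' : n = sw.length := by omega
        have hdec : (P c && decide ((n : Int) < PySem.List.len sw)) = false := by
          simp [PySem.List.len_eq]; intro _; exact_mod_cast hn'.ge
        have hdrop : sw.drop n = [] := by simp [hn']
        simp only [List.foldl_cons, hdec, Bool.false_eq_true, if_false]
        rw [ih d n hn]
        rw [List.filter_cons_of_pos hP, hdrop]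
        simp [hn']
    · have hP' : P c = false := by simpa using hP
      simp only [List.foldl_cons, hP', Bool.false_and, Bool.false_eq_true, if_false]
      rw [ih d n hn, List.filter_cons_of_neg (by simp [hP'])]

-- exclusive prefix sums of the per-row box counts, as B's pass 1 builds them
def pvOffs (B : Int → List Int) : List Int → Nat → List Int
  | [], _ => []
  | r :: rs, t => ((t : Nat) : Int) :: pvOffs B rs (t + (B r).length)

lemma pv_offsets_spec (B : Int → List Int) :
    ∀ (l : List Int) (acc : List Int) (t : Nat),
      (l.foldl (fun (st : List Int × Int) r => (st.1 ++ [st.2], st.2 + PySem.List.len (B r)))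
        (acc, (t : Int))).1 = acc ++ pvOffs B l t := by
  intro l
  induction l with
  | nil => intro acc t; simp [pvOffs]
  | cons r rs ih =>
    intro acc t
    have h : (t : Int) + PySem.List.len (B r) = ((t + (B r).length : Nat) : Int) := by
      simp [PySem.List.len_eq]
    simp only [List.foldl_cons, h, ih, pvOffs, List.append_assoc, List.singleton_append]

-- shifting the start of enumerate by one
lemma pv_enum_succ {α : Type} : ∀ (xs : List α) (b : Int),
    PySem.List.enumerate xs (b + 1) = (PySem.List.enumerate xs b).map (fun ic => (ic.1 + 1, ic.2)) := by
  intro xs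
  induction xs with
  | nil => intro b; simp [PySem.List.enumerate_nil]
  | cons x xs ih =>
    intro b
    rw [PySem.List.enumerate_cons, PySem.List.enumerate_cons, List.map_cons, ih]

-- B's pass-2 inner loop over one row (guarded arithmetic index off+i) equals
-- folding inserts over the row's boxes zipped with the weights from off on.
lemma pv_rowfold (sw : List Int) (r : Int) :
    ∀ (cols : List Int) (off : Nat) (d : PySem.Dict (Int × Int) Int),
      (PySem.List.enumerate cols 0).foldl
        (fun (d : PySem.Dict (Int × Int) Int) ic =>
          if decide ((off : Int) + ic.1 < PySem.List.len sw) then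
            d.insert (r, ic.2) (PySem.List.pyGetD sw ((off : Int) + ic.1) 0)
          else d) d
      = ((cols.map (fun c => (r, c))).zip (sw.drop off)).foldl
          (fun d p => d.insert p.1 p.2) d := by
  intro cols
  induction cols with
  | nil => intro off d; simp [PySem.List.enumerate_nil]
  | cons c cs ih =>
    intro off d
    rw [PySem.List.enumerate_cons, List.foldl_cons, pv_enum_succ, List.foldl_map]
    have hshift : (fun (d : PySem.Dict (Int × Int) Int) (ic : Int × Int) =>
        if decide ((off : Int) + (ic.1 + 1, ic.2).1 < PySem.List.len sw) then
          d.insert (r, (ic.1 + 1, ic.2).2) (PySem.List.pyGetD sw ((off : Int) + (ic.1 + 1, ic.2).1) 0)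
        else d)
      = (fun (d : PySem.Dict (Int × Int) Int) (ic : Int × Int) =>
          if decide (((off + 1 : Nat) : Int) + ic.1 < PySem.List.len sw) then
            d.insert (r, ic.2) (PySem.List.pyGetD sw (((off + 1 : Nat) : Int) + ic.1) 0)
          else d) := by
      funext d ic
      dsimp only
      rw [show (off : Int) + (ic.1 + 1) = ((off + 1 : Nat) : Int) + ic.1 by push_cast; ring]
    rw [hshift, ih (off + 1)]
    dsimp only
    by_cases hlt : off < sw.length
    · have hdec : decide ((off : Int) + (0 : Int) < PySem.List.len sw) = true := by
        simp [PySem.List.len_eq]; exact_mod_cast hlt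
      have hget : PySem.List.pyGetD sw ((off : Int) + 0) 0 = sw[off] := by
        simp [List.getD_eq_getElem?_getD, List.getElem?_eq_getElem hlt]
      have hdrop : sw.drop off = sw[off] :: sw.drop (off + 1) := by
        rw [List.getElem_cons_drop hlt]
      simp only [hdec, hget, if_true, hdrop, List.map_cons, List.zip_cons_cons, List.foldl_cons]
    · have hge : sw.length ≤ off := by omega
      have hdec : decide ((off : Int) + (0 : Int) < PySem.List.len sw) = false := by
        simp [PySem.List.len_eq]; exact_mod_cast hge
      have hdrop : sw.drop off = ([] : List Int) := by simp [hge]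
      have hdrop' : sw.drop (off + 1) = ([] : List Int) := by simp; omega
      simp only [hdec, Bool.false_eq_true, if_false, hdrop, hdrop', List.zip_nil_right,
        List.foldl_nil]

-- B's pass 2 over rows zipped with prefix-sum offsets equals folding inserts over
-- all boxes (row-major) zipped with the weights from the starting offset on.
lemma pv_outer (sw : List Int) (B : Int → List Int) :
    ∀ (rows : List Int) (t : Nat) (d : PySem.Dict (Int × Int) Int),
      ((rows.zip (pvOffs B rows t)).foldl
        (fun (d : PySem.Dict (Int × Int) Int) ro =>
          (PySem.List.enumerate (B ro.1)).foldl
            (fun (d : PySem.Dict (Int × Int) Int) ic =>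
              if decide (ro.2 + ic.1 < PySem.List.len sw) then
                d.insert (ro.1, ic.2) (PySem.List.pyGetD sw (ro.2 + ic.1) 0)
              else d) d) d)
      = ((rows.flatMap (fun r => (B r).map (fun c => (r, c)))).zip (sw.drop t)).foldl
          (fun d p => d.insert p.1 p.2) d := by
  intro rows
  induction rows with
  | nil => intro t d; simp [pvOffs]
  | cons r rs ih =>
    intro t d
    simp only [pvOffs, List.zip_cons_cons, List.foldl_cons, List.flatMap_cons]
    rw [pv_rowfold sw r (B r) t d, ih]
    rw [pv_zip_append, List.foldl_append, List.length_map, List.drop_drop]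

-- ===== VERDICT (by name: the statement is the Claim_ definition above) =====
theorem find_boxes_position_spec : Claim_equal_find_boxes_position := by
  intro grid sw _ _
  show find_boxes_position grid sw = find_boxes_position_alt grid sw
  unfold find_boxes_position find_boxes_position_alt
  cases grid with
  | nil => rfl
  | cons g gs =>
    simp only []
    set P : Int × Int → Bool := fun p =>
      ((PySem.List.pyGetD (PySem.List.pyGetD (g :: gs) p.1 "").toList p.2 ' ' == '$')
        || (PySem.List.pyGetD (PySem.List.pyGetD (g :: gs) p.1 "").toList p.2 ' ' == '*')) with hPdef
    set RB : Int → List Int := fun r =>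
      (PySem.List.pyRange 0 (PySem.Str.len g) 1).filter (fun c => P (r, c)) with hRBdef
    have hw : PySem.List.pyGetD (g :: gs) 0 "" = g := by
      simp [PySem.List.pyGetD_zero_cons]
    -- rewrite A's nested fold as a single fold over the flattened cell list
    have hnest :
        (PySem.List.pyRange 0 (PySem.List.len (g :: gs)) 1).foldl
          (fun st row =>
            (PySem.List.pyRange 0 (PySem.Str.len (PySem.List.pyGetD (g :: gs) 0 "")) 1).foldl
              (fun (st : PySem.Dict (Int × Int) Int × Int) col =>
                if P (row, col) && decide (st.2 < PySem.List.len sw) then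
                  (st.1.insert (row, col) (PySem.List.pyGetD sw st.2 0), st.2 + 1)
                else st)
              st)
          ((PySem.Dict.empty : PySem.Dict (Int × Int) Int), (0 : Int))
        = ((PySem.List.pyRange 0 (PySem.List.len (g :: gs)) 1).flatMap (fun r =>
              (PySem.List.pyRange 0 (PySem.Str.len g) 1).map (fun c => (r, c)))).foldl
            (fun (st : PySem.Dict (Int × Int) Int × Int) c =>
              if P c && decide (st.2 < PySem.List.len sw) then
                (st.1.insert c (PySem.List.pyGetD sw st.2 0), st.2 + 1)
              else st)
            ((PySem.Dict.empty : PySem.Dict (Int × Int) Int), (0 : Int)) := by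
      rw [pv_foldl_flatMap]
      simp [hw, List.foldl_map]
    have hcells :
        (((PySem.List.pyRange 0 (PySem.List.len (g :: gs)) 1).flatMap (fun r =>
            (PySem.List.pyRange 0 (PySem.Str.len g) 1).map (fun c => (r, c)))).filter P)
        = (PySem.List.pyRange 0 (PySem.List.len (g :: gs)) 1).flatMap (fun r =>
            (RB r).map (fun c => (r, c))) := by
      rw [List.filter_flatMap]
      apply List.flatMap_congr (fun r _ => ?_)
      rw [List.filter_map]
      rfl
    rw [hnest]
    have hA := pv_foldA_eq sw P
      ((PySem.List.pyRange 0 (PySem.List.len (g :: gs)) 1).flatMap (fun r =>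
        (PySem.List.pyRange 0 (PySem.Str.len g) 1).map (fun c => (r, c))))
      PySem.Dict.empty 0 (Nat.zero_le _)
    simp only [Nat.cast_zero, List.drop_zero] at hA
    rw [hA, hcells]
    -- B side: offsets are the prefix sums, pass 2 is the same zipped insert fold
    have hoffs := pv_offsets_spec RB (PySem.List.pyRange 0 (PySem.List.len (g :: gs)) 1) [] 0
    simp only [Nat.cast_zero, List.nil_append] at hoffs
    rw [hoffs, pv_outer sw RB (PySem.List.pyRange 0 (PySem.List.len (g :: gs)) 1) 0]
    rfl
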